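-- pv_equiv track=rewrite | github.com/AnTitova/2019-2-level-labs | lab_4/main.py | clean_tokenize_corpus
-- ===== SOURCE A (Python) =====
-- def clean_tokenize_corpus(texts: list) -> list:
--     if not isinstance(texts, list):
--         return []
--     lst_words = []
--     for tex in texts:
--         if not isinstance(tex, str):
--             continue
--         text = tex.replace('<br />', ' ')
--         n_text = ''
--         for symbol in text:
--             if symbol.isalpha() or symbol == ' ':
--                 n_text += symbol.lower()
--         lst_words.append(n_text.split())
--     return lst_words
-- ===== SOURCE B (Python) =====
-- def clean_tokenize_corpus(texts: list) -> list:
--     if not isinstance(texts, list):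
--         return []
--     out = []
--     for tex in texts:
--         if not isinstance(tex, str):
--             continue
--         words = []
--         buf = []
--         for ch in tex.replace('<br />', ' '):
--             if ch.isalpha():
--                 buf.append(ch.lower())
--             elif ch == ' ':
--                 if buf:
--                     words.append(''.join(buf))
--                     buf = []
--         if buf:
--             words.append(''.join(buf))
--         out.append(words)
--     return out
-- ===== Notes on version B (the rewrite author's own statement) =====
-- stated objective: alternative
-- what changed: Instead of building an intermediate cleaned string and then calling .split(), B tokenizes each text in one pass with a word buffer: alpha chars are lowercased into the buffer, a space flushes a non-empty buffer as a word, other chars are skipped.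
import Mathlib
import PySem

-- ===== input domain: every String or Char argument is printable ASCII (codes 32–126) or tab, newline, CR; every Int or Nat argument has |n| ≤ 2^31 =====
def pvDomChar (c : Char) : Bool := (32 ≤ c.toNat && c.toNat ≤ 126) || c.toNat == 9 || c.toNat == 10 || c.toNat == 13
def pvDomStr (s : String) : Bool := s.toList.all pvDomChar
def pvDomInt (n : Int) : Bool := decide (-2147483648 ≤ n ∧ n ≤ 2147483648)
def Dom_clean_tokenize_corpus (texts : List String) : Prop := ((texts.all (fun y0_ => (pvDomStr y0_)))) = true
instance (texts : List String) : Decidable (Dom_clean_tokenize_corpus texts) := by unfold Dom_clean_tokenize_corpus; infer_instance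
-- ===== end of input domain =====

-- B replaces A's filter-then-split (intermediate cleaned string + .split()) by a single buffered pass per text; alternative decomposition, same cost.

-- ===== PORT A =====
def clean_tokenize_corpus (texts : List String) : List (List String) :=
  texts.foldl (fun lst_words tex =>
    let text := PySem.Str.replace tex "<br />" " "
    let n_text := text.toList.foldl (fun n_text symbol =>
      if PySem.Chars.isalpha symbol || symbol == ' ' then n_text.push (PySem.Chars.lowerChar symbol)
      else n_text) ""
    lst_words ++ [PySem.Str.split₀ n_text]) []

-- ===== PORT B =====
-- one buffered pass: alpha → lowercase into buf; ' ' → flush non-empty buf; else skip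
def pvTokB : List Char → List String → List Char → List String
  | [], words, buf => if buf.isEmpty then words else words ++ [String.ofList buf]
  | c :: rest, words, buf =>
    if PySem.Chars.isalpha c then pvTokB rest words (buf ++ [PySem.Chars.lowerChar c])
    else if c == ' ' then
      if buf.isEmpty then pvTokB rest words buf
      else pvTokB rest (words ++ [String.ofList buf]) []
    else pvTokB rest words buf

def clean_tokenize_corpus_alt (texts : List String) : List (List String) :=
  texts.map (fun tex => pvTokB (PySem.Str.replace tex "<br />" " ").toList [] [])

-- ===== PRECONDITION & SPEC =====
def Spec_clean_tokenize_corpus (texts : List String) (out : List (List String)) : Prop := out = clean_tokenize_corpus_alt texts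
instance (texts : List String) (out : List (List String)) : Decidable (Spec_clean_tokenize_corpus texts out) := by unfold Spec_clean_tokenize_corpus; infer_instance

-- ===== CLAIM (what is proved, stated in full; the proofs are below) =====
def Claim_equal_clean_tokenize_corpus : Prop := ∀ (texts : List String), Dom_clean_tokenize_corpus texts → Spec_clean_tokenize_corpus texts (clean_tokenize_corpus texts)

-- ===== LEMMAS AND PROOFS =====

-- A's filter loop, as a list of chars
theorem pv_filt (cs : List Char) (s : String) :
    (cs.foldl (fun n_text symbol =>
      if PySem.Chars.isalpha symbol || symbol == ' ' then n_text.push (PySem.Chars.lowerChar symbol)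
      else n_text) s).toList
    = s.toList ++ (cs.filter (fun c => PySem.Chars.isalpha c || c == ' ')).map PySem.Chars.lowerChar := by
  induction cs generalizing s with
  | nil => simp
  | cons c cs ih =>
    rw [List.foldl_cons, List.filter_cons]
    by_cases h : (PySem.Chars.isalpha c || c == ' ') = true
    · rw [if_pos h, if_pos h, ih]
      simp
    · rw [if_neg h, if_neg h, ih]

theorem pv_toNat_ofNat (n : Nat) (h : n < 55296) : (Char.ofNat n).toNat = n := by
  unfold Char.ofNat
  rw [dif_pos (Or.inl h)]
  rfl

theorem pv_lowerChar_not_space (c : Char) (h : PySem.Chars.isalpha c = true) :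
    PySem.Chars.isspace (PySem.Chars.lowerChar c) = false := by
  have hmain : 97 ≤ (PySem.Chars.lowerChar c).toNat ∧ (PySem.Chars.lowerChar c).toNat ≤ 122 := by
    rcases (by simpa [PySem.Chars.isalpha] using h :
        PySem.Chars.isupper c = true ∨ PySem.Chars.islower c = true) with hup | hlo
    · have hb : 65 ≤ c.toNat ∧ c.toNat ≤ 90 := by
        simpa [PySem.Chars.isupper, Char.le_def, UInt32.le_iff_toNat_le] using hup
      have hval : (PySem.Chars.lowerChar c).toNat = c.toNat + 32 := by
        rw [PySem.Chars.lowerChar, if_pos hup, pv_toNat_ofNat _ (by omega)]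
      omega
    · have hb : 97 ≤ c.toNat ∧ c.toNat ≤ 122 := by
        simpa [PySem.Chars.islower, Char.le_def, UInt32.le_iff_toNat_le] using hlo
      have hup : PySem.Chars.isupper c = false := by
        by_contra hne
        have h2 : PySem.Chars.isupper c = true := by simpa using hne
        have hb2 : 65 ≤ c.toNat ∧ c.toNat ≤ 90 := by
          simpa [PySem.Chars.isupper, Char.le_def, UInt32.le_iff_toNat_le] using h2
        omega
      have hval : PySem.Chars.lowerChar c = c := by
        rw [PySem.Chars.lowerChar, if_neg (by simp [hup])]
      rw [hval]
      exact hb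
  simp only [PySem.Chars.isspace, Bool.or_eq_false_iff, Bool.and_eq_false_iff,
    decide_eq_false_iff_not]
  omega

-- one-step unfolding lemmas for split₀.go and pvTokB
theorem pv_go_space (rest cur : List Char) (acc : List (List Char)) :
    PySem.Chars.split₀.go (' ' :: rest) cur acc
    = if cur.isEmpty then PySem.Chars.split₀.go rest [] acc
      else PySem.Chars.split₀.go rest [] (cur.reverse :: acc) := by
  simp only [PySem.Chars.split₀.go]
  rw [if_pos (by decide : PySem.Chars.isspace ' ' = true)]

theorem pv_go_char (c : Char) (rest cur : List Char) (acc : List (List Char))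
    (h : PySem.Chars.isspace c = false) :
    PySem.Chars.split₀.go (c :: rest) cur acc = PySem.Chars.split₀.go rest (c :: cur) acc := by
  simp only [PySem.Chars.split₀.go]
  rw [if_neg (by simp [h])]

theorem pv_tok_alpha (c : Char) (rest : List Char) (words : List String) (buf : List Char)
    (h : PySem.Chars.isalpha c = true) :
    pvTokB (c :: rest) words buf = pvTokB rest words (buf ++ [PySem.Chars.lowerChar c]) := by
  simp only [pvTokB]
  rw [if_pos h]

theorem pv_tok_space (rest : List Char) (words : List String) (buf : List Char) :
    pvTokB (' ' :: rest) words buf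
    = if buf.isEmpty then pvTokB rest words buf
      else pvTokB rest (words ++ [String.ofList buf]) [] := by
  simp only [pvTokB]
  rw [if_neg (by decide : ¬ PySem.Chars.isalpha ' ' = true),
    if_pos (by decide : (' ' == ' ') = true)]

theorem pv_tok_other (c : Char) (rest : List Char) (words : List String) (buf : List Char)
    (h1 : PySem.Chars.isalpha c = false) (h2 : (c == ' ') = false) :
    pvTokB (c :: rest) words buf = pvTokB rest words buf := by
  simp only [pvTokB]
  rw [if_neg (by simp [h1]), if_neg (by simp [h2])]

-- main invariant: split₀.go on the filtered+lowered chars matches the buffered pass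
theorem pv_main (cs : List Char) (cur : List Char) (acc : List (List Char)) :
    (PySem.Chars.split₀.go ((cs.filter (fun c => PySem.Chars.isalpha c || c == ' ')).map PySem.Chars.lowerChar) cur acc).map String.ofList
    = pvTokB cs (acc.reverse.map String.ofList) cur.reverse := by
  induction cs generalizing cur acc with
  | nil =>
    simp only [List.filter_nil, List.map_nil, PySem.Chars.split₀.go, pvTokB]
    by_cases h : cur.isEmpty <;> simp_all
  | cons c cs ih =>
    by_cases ha : PySem.Chars.isalpha c = true
    · rw [List.filter_cons, if_pos (by simp [ha]), List.map_cons,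
        pv_go_char _ _ _ _ (pv_lowerChar_not_space c ha), pv_tok_alpha _ _ _ _ ha, ih]
      simp
    · by_cases hsp : c = ' '
      · subst hsp
        rw [List.filter_cons, if_pos (by decide : (PySem.Chars.isalpha ' ' || ' ' == ' ') = true),
          List.map_cons, (by decide : PySem.Chars.lowerChar ' ' = ' '), pv_go_space, pv_tok_space]
        by_cases hc : cur.isEmpty = true
        · have hce : cur = [] := by simpa using hc
          subst hce
          simpa using ih [] acc
        · rw [if_neg hc, if_neg (by simpa using hc), ih]
          simp
      · have hb : (c == ' ') = false := by simpa using hsp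
        have ha' : PySem.Chars.isalpha c = false := by simpa using ha
        rw [List.filter_cons, if_neg (by simp [ha', hb]), pv_tok_other _ _ _ _ ha' hb, ih]

-- per-text equality
theorem pv_text (tex : String) :
    PySem.Str.split₀
      ((PySem.Str.replace tex "<br />" " ").toList.foldl (fun n_text symbol =>
        if PySem.Chars.isalpha symbol || symbol == ' ' then n_text.push (PySem.Chars.lowerChar symbol)
        else n_text) "")
    = pvTokB (PySem.Str.replace tex "<br />" " ").toList [] [] := by
  rw [PySem.Str.split₀, pv_filt]
  simpa [PySem.Chars.split₀] using
    pv_main (PySem.Str.replace tex "<br />" " ").toList [] []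

theorem pv_fold (texts : List String) (acc : List (List String)) :
    texts.foldl (fun lst_words tex =>
      let text := PySem.Str.replace tex "<br />" " "
      let n_text := text.toList.foldl (fun n_text symbol =>
        if PySem.Chars.isalpha symbol || symbol == ' ' then n_text.push (PySem.Chars.lowerChar symbol)
        else n_text) ""
      lst_words ++ [PySem.Str.split₀ n_text]) acc
    = acc ++ texts.map (fun tex => pvTokB (PySem.Str.replace tex "<br />" " ").toList [] []) := by
  induction texts generalizing acc with
  | nil => simp
  | cons t ts ih =>
    rw [List.foldl_cons, ih, List.map_cons]
    simp only [pv_text]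
    simp

-- ===== VERDICT (by name: the statement is the Claim_ definition above) =====
theorem clean_tokenize_corpus_spec : Claim_equal_clean_tokenize_corpus := by
  intro texts _
  show clean_tokenize_corpus texts = clean_tokenize_corpus_alt texts
  rw [clean_tokenize_corpus, clean_tokenize_corpus_alt, pv_fold]
  simp
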